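-- pv_equiv track=rewrite | github.com/scardona55/robotica | combinacion.py | obtener_mapa_descriptivo
-- ===== SOURCE A (Python) =====
-- def obtener_mapa_descriptivo(maze):
--     """
--     Genera una matriz descriptiva del estado del mapa.
--     'S' representa el inicio.
--     'E' representa la salida.
--     'O' representa obstáculos.
--     'P' representa pasillos.
--     """
--     rows = len(maze)
--     cols = len(maze[0])
--     mapa_descriptivo = []
--
--     for i in range(rows):
--         fila = []
--         for j in range(cols):
--             if i == 0 and j == 0:  # Inicio
--                 fila.append('S')
--             elif i == rows - 1 and j == cols - 1:  # Salida
--                 fila.append('E')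
--             elif maze[i][j] == 1:  # Obstáculo
--                 fila.append('O')
--             else:  # Pasillo
--                 fila.append('P')
--         mapa_descriptivo.append(fila)
--
--     return mapa_descriptivo
-- ===== SOURCE B (Python) =====
-- def obtener_mapa_descriptivo(maze):
--     """
--     Genera una matriz descriptiva del estado del mapa.
--     'S' representa el inicio.
--     'E' representa la salida.
--     'O' representa obstaculos.
--     'P' representa pasillos.
--     """
--     cols = len(maze[0])
--
--     def mark(row, js):
--         return ['O' if row[j] == 1 else 'P' for j in js]
--
--     if len(maze) == 1:
--         # single row: it is both the first and the last row; 'S' wins the corner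
--         if cols == 1:
--             return [['S']]
--         return [['S'] + mark(maze[0], range(1, cols - 1)) + ['E']]
--     first = ['S'] + mark(maze[0], range(1, cols))
--     middle = [mark(r, range(cols)) for r in maze[1:-1]]
--     last = mark(maze[-1], range(cols - 1)) + ['E']
--     return [first] + middle + [last]
-- ===== Notes on version B (the rewrite author's own statement) =====
-- stated objective: alternative
-- what changed: Instead of A's nested index loops with a positional if/elif chain at every cell, B decomposes the grid into regions — a first row built as ['S'] plus marked cells, a middle block mapped uniformly, and a last row of marked cells plus ['E'] — assembled by concatenation, with a dedicated single-row case where 'S' takes the shared corner.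
-- outside the precondition, e.g. on obtener_mapa_descriptivo([[]]): A returns [[]], B returns [['S', 'E']]
import Mathlib
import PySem

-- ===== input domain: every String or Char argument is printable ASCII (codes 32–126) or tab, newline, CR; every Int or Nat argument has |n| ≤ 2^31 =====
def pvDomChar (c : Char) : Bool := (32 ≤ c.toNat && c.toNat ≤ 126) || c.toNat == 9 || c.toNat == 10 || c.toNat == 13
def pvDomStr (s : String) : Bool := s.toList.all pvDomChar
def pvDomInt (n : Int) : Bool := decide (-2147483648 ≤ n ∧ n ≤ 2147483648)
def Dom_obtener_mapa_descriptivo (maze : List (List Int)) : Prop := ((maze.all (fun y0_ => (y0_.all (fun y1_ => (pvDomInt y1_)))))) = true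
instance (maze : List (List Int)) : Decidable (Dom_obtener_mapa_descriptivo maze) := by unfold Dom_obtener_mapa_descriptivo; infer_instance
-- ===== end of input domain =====

-- B decomposes the grid into regions (first row, middle block, last row) built by
-- concatenation, with the corner labels placed structurally instead of A's per-cell
-- positional if/elif chain; objective: alternative decomposition, same cost.

-- ===== PORT A =====
def obtener_mapa_descriptivo (maze : List (List Int)) : List (List String) :=
  let rows := maze.length
  let cols := (maze.headD []).length    -- maze[0]; the [] default is only hit outside Pre_ (maze = [])
  (List.range rows).map (fun i =>
    (List.range cols).map (fun j =>
      if i = 0 ∧ j = 0 then "S"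
      else if i = rows - 1 ∧ j = cols - 1 then "E"
      else if (maze.getD i []).getD j 0 = 1 then "O"   -- defaults only hit outside Pre_
      else "P"))

-- ===== PORT B =====
-- helper 'mark': ['O' if row[j] == 1 else 'P' for j in js]; the getD default is only hit outside Pre_
def pvMark (row : List Int) (js : List Nat) : List String :=
  js.map (fun j => if row.getD j 0 = 1 then "O" else "P")

def obtener_mapa_descriptivo_alt (maze : List (List Int)) : List (List String) :=
  let cols := (maze.headD []).length          -- len(maze[0]); default only hit outside Pre_
  if maze.length = 1 then
    if cols = 1 then [["S"]]
    else [["S"] ++ pvMark (maze.headD []) (List.range' 1 (cols - 2)) ++ ["E"]]  -- range(1, cols-1)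
  else
    let first := ["S"] ++ pvMark (maze.headD []) (List.range' 1 (cols - 1))    -- range(1, cols)
    let middle := ((maze.drop 1).dropLast).map (fun r => pvMark r (List.range cols))  -- maze[1:-1]
    let last := pvMark (maze.getLastD []) (List.range (cols - 1)) ++ ["E"]     -- maze[-1], range(cols-1)
    [first] ++ middle ++ [last]

-- ===== PRECONDITION & SPEC =====
-- Pre_ excludes maze = [] (A raises IndexError), mazes with a row too short for the cells A
-- reads (A raises IndexError), and zero-column mazes (maze[0] = []), a degenerate corner on
-- which A returns a stack of empty rows with no start/exit while B still marks the two
-- corners — both values are defensible for a maze with no cells (cited in claim.json).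
def Pre_obtener_mapa_descriptivo (maze : List (List Int)) : Prop :=
  maze ≠ [] ∧ maze.headD [] ≠ [] ∧
  (∀ r ∈ (maze.drop 1).dropLast, (maze.headD []).length ≤ r.length) ∧
  (maze.headD []).length ≤ (maze.getLastD []).length + 1
instance (maze : List (List Int)) : Decidable (Pre_obtener_mapa_descriptivo maze) := by unfold Pre_obtener_mapa_descriptivo; infer_instance

def pvWitness_obtener_mapa_descriptivo : List (List Int) := [[0, 1], [1, 0]]

def Spec_obtener_mapa_descriptivo (maze : List (List Int)) (out : List (List String)) : Prop := out = obtener_mapa_descriptivo_alt maze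
instance (maze : List (List Int)) (out : List (List String)) : Decidable (Spec_obtener_mapa_descriptivo maze out) := by unfold Spec_obtener_mapa_descriptivo; infer_instance

-- ===== CLAIM =====
def Claim_equal_obtener_mapa_descriptivo : Prop := ∀ (maze : List (List Int)), Dom_obtener_mapa_descriptivo maze → Pre_obtener_mapa_descriptivo maze → Spec_obtener_mapa_descriptivo maze (obtener_mapa_descriptivo maze)

-- ===== LEMMAS AND PROOFS =====

-- range n split as first element, middle block, last element (n ≥ 2)
theorem pv_range_split2 (n : Nat) (h : 2 ≤ n) :
    List.range n = [0] ++ List.range' 1 (n-2) ++ [n-1] := by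
  have h2 : [n-1] = List.range' (1 + (n-2)) 1 := by simp [List.range']; omega
  have h3 := List.range'_append (s := 1) (m := n-2) (n := 1) (step := 1)
  have h4 := List.range'_append (s := 0) (m := 1) (n := n-2+1) (step := 1)
  simp only [Nat.mul_one, Nat.one_mul, Nat.zero_add] at h3 h4
  rw [List.range_eq_range', h2, show ([0] : List Nat) = List.range' 0 1 from rfl,
    List.append_assoc, h3, h4]
  congr 1; omega

theorem pv_range_split1 (n : Nat) (h : 1 ≤ n) :
    List.range n = [0] ++ List.range' 1 (n-1) := by
  have h4 := List.range'_append (s := 0) (m := 1) (n := n-1) (step := 1)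
  simp only [Nat.mul_one, Nat.zero_add] at h4
  rw [List.range_eq_range', show ([0] : List Nat) = List.range' 0 1 from rfl, h4]
  congr 1; omega

theorem pv_range_splitL (n : Nat) (h : 1 ≤ n) :
    List.range n = List.range (n-1) ++ [n-1] := by
  conv_lhs => rw [show n = (n-1)+1 by omega]
  rw [List.range_succ]

theorem pv_single_row (r0 : List Int) (h0 : r0 ≠ []) :
    obtener_mapa_descriptivo [r0] = obtener_mapa_descriptivo_alt [r0] := by
  have hlen : 1 <= r0.length := List.length_pos_iff.mpr h0
  unfold obtener_mapa_descriptivo obtener_mapa_descriptivo_alt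
  by_cases hc : r0.length = 1
  · simp [hc, List.range_succ]
  · simp only [List.headD, List.length_cons, List.length_nil, if_neg hc,
      List.range_succ, List.range_zero, List.nil_append, List.map_cons, List.map_nil]
    congr 1
    rw [pv_range_split2 r0.length (by omega), List.map_append, List.map_append]
    refine congrArg₂ (· ++ ·) (congrArg₂ (· ++ ·) ?_ ?_) ?_
    · simp
    · apply List.map_congr_left
      intro j hj
      rw [List.mem_range'_1] at hj
      have h1 : ¬(j = 0) := by omega
      have h2 : ¬(j = r0.length - 1) := by omega
      simp [h1, h2]
    · have h1 : ¬(r0.length - 1 = 0) := by omega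
      simp [h1]

theorem pv_multi_row (r0 r1 : List Int) (rest : List (List Int)) (h0 : r0 ≠ []) :
    obtener_mapa_descriptivo (r0 :: r1 :: rest)
      = obtener_mapa_descriptivo_alt (r0 :: r1 :: rest) := by
  have hc : 1 <= r0.length := List.length_pos_iff.mpr h0
  set maze : List (List Int) := r0 :: r1 :: rest with hmaze
  have hrows : 2 <= maze.length := by simp [hmaze]
  unfold obtener_mapa_descriptivo obtener_mapa_descriptivo_alt
  simp only [show maze.headD [] = r0 from rfl]
  rw [if_neg (by omega : ¬ maze.length = 1)]
  rw [pv_range_split2 maze.length hrows, List.map_append, List.map_append]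
  refine congrArg₂ (· ++ ·) (congrArg₂ (· ++ ·) ?_ ?_) ?_
  -- first row
  · simp only [List.map_cons, List.map_nil]
    congr 1
    rw [pv_range_split1 r0.length hc, List.map_append]
    refine congrArg₂ (· ++ ·) ?_ ?_
    · simp
    · apply List.map_congr_left
      intro j hj
      rw [List.mem_range'_1] at hj
      have h1 : ¬(j = 0) := by omega
      simp [h1, hmaze]
  -- middle block
  · apply List.ext_getElem
    · simp [hmaze]
    · intro k hk1 hk2
      simp only [List.length_map, List.length_range'] at hk1
      simp only [List.getElem_map, List.getElem_range', Nat.one_mul, pvMark]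
      have hkd : k < (maze.drop 1).dropLast.length := by
        simpa using hk2
      have hkm : k + 1 < maze.length := by
        simp only [hmaze, List.drop_succ_cons, List.drop_zero, List.length_dropLast,
          List.length_cons] at hkd
        simp [hmaze]; omega
      have h2 : ¬(1 + k = maze.length - 1) := by
        simp only [hmaze, List.drop_succ_cons, List.drop_zero, List.length_dropLast,
          List.length_cons] at hkd
        simp [hmaze]; omega
      have hget : maze[1+k]? = some (maze[k+1]'hkm) := by
        rw [Nat.add_comm]; exact List.getElem?_eq_getElem hkm
      simp [h2, hget]
  -- last row
  · simp only [List.map_cons, List.map_nil]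
    congr 1
    have hgl : maze.getLastD [] = maze.getD (maze.length - 1) [] := by
      have hp : 0 < maze.length := by omega
      rw [List.getD_eq_getElem _ _ (by omega)]
      rw [List.getLastD_eq_getLast?, List.getLast?_eq_getElem?]
      simp [List.getElem?_eq_getElem (by omega : maze.length - 1 < maze.length)]
    rw [pv_range_splitL r0.length hc, List.map_append]
    congr 1
    · rw [hgl]
      apply List.map_congr_left
      intro j hj
      rw [List.mem_range] at hj
      have h1 : ¬(maze.length - 1 = 0) := by omega
      have h2 : ¬(j = r0.length - 1) := by omega
      simp [h1, h2]
    · have h1 : ¬(maze.length - 1 = 0) := by omega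
      simp [h1]

-- ===== VERDICT =====
theorem obtener_mapa_descriptivo_spec : Claim_equal_obtener_mapa_descriptivo := by
  intro maze _ hpre
  obtain ⟨hne, h0, hm, hl⟩ := hpre
  unfold Spec_obtener_mapa_descriptivo
  match maze, hne with
  | [r0], _ => exact (pv_single_row r0 h0).symm ▸ rfl
  | r0 :: r1 :: rest, _ =>
      exact pv_multi_row r0 r1 rest h0
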